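-- pv_equiv track=rewrite | github.com/allenai/decon | python/generate_orchestrator_command.py | shorten_name
-- ===== SOURCE A (Python) =====
-- def shorten_name(name, max_length=50):
--     """Shorten a name if it exceeds max_length by taking first and last parts."""
--     if len(name) <= max_length:
--         return name
--
--     # Keep some chars from start and end
--     keep_start = max_length // 2 - 2
--     keep_end = max_length // 2 - 2
--     shortened = f"{name[:keep_start]}--{name[-keep_end:]}"
--
--     # Clean up any accidental double dashes
--     while '--' in shortened:
--         shortened = shortened.replace('--', '-')
--
--     return shortened
-- ===== SOURCE B (Python) =====
-- def shorten_name(name, max_length=50):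
--     """Shorten a name if it exceeds max_length by taking first and last parts."""
--     if len(name) <= max_length:
--         return name
--     keep = max_length // 2 - 2
--     s = name[:keep] + '--' + name[-keep:]
--     # single left-to-right pass: never emit a '-' right after an emitted '-'
--     out = []
--     for ch in s:
--         if ch == '-' and out and out[-1] == '-':
--             continue
--         out.append(ch)
--     return ''.join(out)
-- ===== Notes on version B (the rewrite author's own statement) =====
-- stated objective: alternative
-- what changed: A collapses dashes by repeatedly calling replace('--','-') and rescanning until no '--' remains; B makes a single left-to-right pass that skips a dash whenever the previously emitted character is a dash.
import Mathlib
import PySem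

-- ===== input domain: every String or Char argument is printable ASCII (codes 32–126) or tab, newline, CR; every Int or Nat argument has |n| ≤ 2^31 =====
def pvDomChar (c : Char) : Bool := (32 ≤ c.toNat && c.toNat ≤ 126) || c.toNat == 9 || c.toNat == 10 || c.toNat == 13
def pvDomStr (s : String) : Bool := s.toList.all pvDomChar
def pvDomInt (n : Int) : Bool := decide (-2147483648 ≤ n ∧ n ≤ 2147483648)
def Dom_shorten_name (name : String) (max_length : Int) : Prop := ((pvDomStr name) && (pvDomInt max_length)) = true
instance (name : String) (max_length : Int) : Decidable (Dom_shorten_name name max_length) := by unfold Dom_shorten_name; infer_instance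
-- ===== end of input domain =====

-- B replaces A's repeated replace('--','-') fixpoint loop by one left-to-right pass
-- that skips a '-' emitted right after a '-' (objective: faster, one pass instead of rescans).

-- ===== PORT A =====
-- helper characterisation of replace('--','-'), needed by the port's termination proof
def pvRep : List Char → List Char
  | [] => []
  | [c] => [c]
  | a :: b :: t => if a = '-' ∧ b = '-' then '-' :: pvRep t else a :: pvRep (b :: t)

theorem pvRep_go (fuel : Nat) : ∀ (l acc : List Char), l.length ≤ fuel →
    PySem.Chars.replace.go ['-', '-'] ['-'] fuel l acc = acc.reverse ++ pvRep l := by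
  induction fuel with
  | zero =>
    intro l acc h
    have : l = [] := List.eq_nil_of_length_eq_zero (Nat.le_zero.mp h)
    subst this; simp [PySem.Chars.replace.go, pvRep]
  | succ n ih =>
    intro l acc h
    match l with
    | [] => simp [PySem.Chars.replace.go, pvRep]
    | c :: t =>
      rw [PySem.Chars.replace.go]
      by_cases hp : List.isPrefixOf ['-', '-'] (c :: t) = true
      · simp only [hp, if_true]
        cases t with
        | nil => simp [List.isPrefixOf] at hp
        | cons b t' =>
          have hc : '-' = c ∧ '-' = b := by simpa [List.isPrefixOf] using hp
          obtain ⟨hc1, hc2⟩ := hc; subst hc1; subst hc2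
          have ht : t'.length ≤ n := by simp at h; omega
          have hdrop : List.drop (['-', '-'] : List Char).length ('-' :: '-' :: t') = t' := rfl
          have hrev : (['-'] : List Char).reverse ++ acc = '-' :: acc := rfl
          rw [hdrop, hrev, ih t' ('-' :: acc) ht]
          simp [pvRep]
      · simp only [hp, if_false, Bool.false_eq_true]
        have ht : t.length ≤ n := by simp at h; omega
        rw [ih t (c :: acc) ht]
        cases t with
        | nil => simp [pvRep]
        | cons b t' =>
          have hnc : ¬ (c = '-' ∧ b = '-') := by
            intro ⟨h1, h2⟩; subst h1; subst h2
            simp [List.isPrefixOf] at hp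
          simp [pvRep, hnc]

theorem pvReplace_eq_rep (s : List Char) :
    PySem.Chars.replace s ['-', '-'] ['-'] = pvRep s := by
  rw [PySem.Chars.replace]
  simp only [List.isEmpty_cons, if_false, Bool.false_eq_true]
  simpa using pvRep_go s.length s [] (le_refl _)

theorem pvRep_length_le (s : List Char) : (pvRep s).length ≤ s.length := by
  induction s using pvRep.induct with
  | case1 => simp [pvRep]
  | case2 c => simp [pvRep]
  | case3 a b t h ih => simp [pvRep, h]; omega
  | case4 a b t h ih => simp [pvRep, h]; simpa using ih

theorem pvRep_length_lt (s : List Char) (h : ['-', '-'] <:+: s) :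
    (pvRep s).length < s.length := by
  induction s using pvRep.induct with
  | case1 => simp at h
  | case2 c =>
    have := h.length_le; simp at this
  | case3 a b t hab ih =>
    obtain ⟨h1, h2⟩ := hab; subst h1; subst h2
    have := pvRep_length_le t
    simp [pvRep]; omega
  | case4 a b t hab ih =>
    have hnp : ¬ (['-', '-'] <+: (a :: b :: t)) := by
      intro hpre
      rcases hpre with ⟨r, hr⟩
      injection hr with e1 hr
      injection hr with e2 _
      exact hab ⟨e1.symm, e2.symm⟩
    rcases (List.infix_cons_iff).mp h with hpre | hinf
    · exact absurd hpre hnp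
    · have := ih hinf
      simp only [List.length_cons] at this
      simp only [pvRep, if_neg hab, List.length_cons]
      omega

def pvLoopA (s : List Char) : List Char :=
  if h : PySem.Chars.isIn ['-', '-'] s = true then
    pvLoopA (PySem.Chars.replace s ['-', '-'] ['-'])
  else s
termination_by s.length
decreasing_by
  rw [pvReplace_eq_rep]
  exact pvRep_length_lt s ((PySem.Chars.isIn_iff_infix _ _).mp h)

def shorten_name (name : String) (max_length : Int) : String :=
  if (PySem.Chars.len name.toList : Int) ≤ max_length then name
  else
    let keep_start := PySem.Int.floordiv max_length 2 - 2
    let keep_end := PySem.Int.floordiv max_length 2 - 2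
    let shortened := PySem.Chars.slice name.toList none (some keep_start)
        ++ ['-', '-'] ++ PySem.Chars.slice name.toList (some (-keep_end)) none
    String.ofList (pvLoopA shortened)

-- ===== PORT B =====
def pvStep (out : List Char) (ch : Char) : List Char :=
  if ch = '-' ∧ out ≠ [] ∧ out.getLast? = some '-' then out else out ++ [ch]

def shorten_name_alt (name : String) (max_length : Int) : String :=
  if (PySem.Chars.len name.toList : Int) ≤ max_length then name
  else
    let keep := PySem.Int.floordiv max_length 2 - 2
    let s := PySem.Chars.slice name.toList none (some keep)
        ++ ['-', '-'] ++ PySem.Chars.slice name.toList (some (-keep)) none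
    String.ofList (s.foldl pvStep [])

-- ===== PRECONDITION & SPEC =====
def Spec_shorten_name (name : String) (max_length : Int) (out : String) : Prop := out = shorten_name_alt name max_length
instance (name : String) (max_length : Int) (out : String) : Decidable (Spec_shorten_name name max_length out) := by unfold Spec_shorten_name; infer_instance

-- ===== CLAIM (what is proved, stated in full; the proofs are below) =====
def Claim_equal_shorten_name : Prop := ∀ (name : String) (max_length : Int), Dom_shorten_name name max_length → Spec_shorten_name name max_length (shorten_name name max_length)

-- ===== LEMMAS AND PROOFS =====
-- canonical "collapse each run of dashes" function, the common value of both loops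
def pvGo (p : Char) : List Char → List Char
  | [] => []
  | y :: ys => if p = '-' ∧ y = '-' then pvGo p ys else y :: pvGo y ys

def pvF : List Char → List Char
  | [] => []
  | x :: xs => x :: pvGo x xs

theorem pvGo_nil (p : Char) : pvGo p [] = [] := rfl

theorem pvGo_cons (p y : Char) (ys : List Char) :
    pvGo p (y :: ys) = if p = '-' ∧ y = '-' then pvGo p ys else y :: pvGo y ys := rfl

theorem pvGo_rep (s : List Char) : ∀ p, pvGo p (pvRep s) = pvGo p s := by
  induction s using pvRep.induct with
  | case1 => intro p; rfl
  | case2 c => intro p; rfl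
  | case3 a b t hab ih =>
    obtain ⟨h1, h2⟩ := hab; subst h1; subst h2
    intro p
    simp only [pvRep]
    by_cases hp : p = '-'
    · simp [pvGo_cons, hp, ih]
    · simp [pvGo_cons, hp, ih]
  | case4 a b t hab ih =>
    intro p
    simp only [pvRep, if_neg hab]
    by_cases hp : p = '-' ∧ a = '-'
    · simp [pvGo_cons, hp, ih]
    · simp [pvGo_cons, hp, ih]

theorem pvF_rep (s : List Char) : pvF (pvRep s) = pvF s := by
  match s with
  | [] => rfl
  | [c] => rfl
  | a :: b :: t =>
    by_cases hab : a = '-' ∧ b = '-'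
    · obtain ⟨h1, h2⟩ := hab; subst h1; subst h2
      simp [pvRep, pvF, pvGo_cons, pvGo_rep]
    · simp [pvRep, pvF, pvGo_cons, hab, pvGo_rep]

theorem pvGo_eq_self (s : List Char) : ∀ p, ¬ (['-', '-'] <:+: (p :: s)) → pvGo p s = s := by
  induction s with
  | nil => intro p _; rfl
  | cons y ys ih =>
    intro p h
    have hpy : ¬ (p = '-' ∧ y = '-') := by
      intro ⟨h1, h2⟩; subst h1; subst h2
      exact h ⟨[], ys, by simp⟩
    have hys : ¬ (['-', '-'] <:+: (y :: ys)) := fun hc => h (hc.trans (List.infix_cons_iff.mpr (Or.inr (List.infix_refl _))))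
    simp [pvGo_cons, hpy, ih y hys]

theorem pvLoopA_eq_pvF (s : List Char) : pvLoopA s = pvF s := by
  induction s using pvLoopA.induct with
  | case1 s h ih =>
    rw [pvLoopA, dif_pos h, ih, pvReplace_eq_rep, pvF_rep]
  | case2 s h =>
    rw [pvLoopA, dif_neg h]
    have hni : ¬ (['-', '-'] <:+: s) := (PySem.Chars.isIn_eq_false_iff _ _).mp (by simpa using h)
    match s with
    | [] => rfl
    | x :: xs => simp [pvF, pvGo_eq_self xs x hni]


theorem pvFoldl_go (s : List Char) : ∀ (acc : List Char) p, acc.getLast? = some p →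
    List.foldl pvStep acc s = acc ++ pvGo p s := by
  induction s with
  | nil => intro acc p _; simp [pvGo_nil]
  | cons y ys ih =>
    intro acc p hlast
    have hne : acc ≠ [] := by intro h; subst h; simp at hlast
    by_cases hc : y = '-' ∧ p = '-'
    · obtain ⟨h1, h2⟩ := hc; subst h1; subst h2
      simp only [List.foldl_cons]
      rw [show pvStep acc '-' = acc from by simp [pvStep, hne, hlast]]
      rw [ih acc '-' hlast]
      simp [pvGo_cons]
    · simp only [List.foldl_cons]
      have hstep : pvStep acc y = acc ++ [y] := by
        rw [pvStep, if_neg]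
        intro ⟨h1, _, h3⟩
        exact hc ⟨h1, by rw [hlast] at h3; exact Option.some_inj.mp h3⟩
      rw [hstep, ih (acc ++ [y]) y (by simp)]
      have : ¬ (p = '-' ∧ y = '-') := fun ⟨u, v⟩ => hc ⟨v, u⟩
      simp [pvGo_cons, this]

theorem pvFoldl_eq_pvF (s : List Char) : List.foldl pvStep [] s = pvF s := by
  match s with
  | [] => rfl
  | x :: xs =>
    simp only [List.foldl_cons]
    rw [show pvStep [] x = [x] from by simp [pvStep]]
    rw [pvFoldl_go xs [x] x (by simp)]
    rfl

-- ===== VERDICT (by name: the statement is the Claim_ definition above) =====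
theorem shorten_name_spec : Claim_equal_shorten_name := by
  intro name max_length _
  unfold Spec_shorten_name shorten_name shorten_name_alt
  by_cases h : (PySem.Chars.len name.toList : Int) ≤ max_length
  · rw [if_pos h, if_pos h]
  · rw [if_neg h, if_neg h]
    simp only [pvLoopA_eq_pvF, pvFoldl_eq_pvF]
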